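-- pv_equiv track=rewrite | github.com/maghams62/auto_mac | src/youtube/timestamp_parser.py | _replace_word_numbers
-- ===== SOURCE A (Python) =====
-- _WORD_NUMBERS = {
--     "zero": 0,
--     "one": 1,
--     "two": 2,
--     "three": 3,
--     "four": 4,
--     "five": 5,
--     "six": 6,
--     "seven": 7,
--     "eight": 8,
--     "nine": 9,
--     "ten": 10,
--     "eleven": 11,
--     "twelve": 12,
--     "thirteen": 13,
--     "fourteen": 14,
--     "fifteen": 15,
--     "sixteen": 16,
--     "seventeen": 17,
--     "eighteen": 18,
--     "nineteen": 19,
--     "twenty": 20,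
--     "thirty": 30,
--     "forty": 40,
--     "fifty": 50,
--     "sixty": 60,
--     "seventy": 70,
--     "eighty": 80,
--     "ninety": 90,
-- }
--
-- def _replace_word_numbers(text: str) -> str:
--     tokens = text.split()
--     result = []
--     i = 0
--     while i < len(tokens):
--         token = tokens[i]
--         value = _WORD_NUMBERS.get(token)
--         if value is None:
--             result.append(token)
--             i += 1
--             continue
--
--         total = value
--         j = i + 1
--         while j < len(tokens):
--             next_value = _WORD_NUMBERS.get(tokens[j])
--             if next_value is None:
--                 break
--             total += next_value
--             j += 1
--         result.append(str(total))
--         i = j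
--
--     return " ".join(result)
-- ===== SOURCE B (Python) =====
-- _WORD_NUMBERS = {
--     "zero": 0, "one": 1, "two": 2, "three": 3, "four": 4, "five": 5,
--     "six": 6, "seven": 7, "eight": 8, "nine": 9, "ten": 10,
--     "eleven": 11, "twelve": 12, "thirteen": 13, "fourteen": 14,
--     "fifteen": 15, "sixteen": 16, "seventeen": 17, "eighteen": 18,
--     "nineteen": 19, "twenty": 20, "thirty": 30, "forty": 40,
--     "fifty": 50, "sixty": 60, "seventy": 70, "eighty": 80, "ninety": 90,
-- }
--
--
-- def _merge(tokens):
--     # Right-to-left structural recursion: a number-word merges into an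
--     # int already sitting at the head of the processed tail.
--     if not tokens:
--         return []
--     rest = _merge(tokens[1:])
--     value = _WORD_NUMBERS.get(tokens[0])
--     if value is None:
--         return [tokens[0]] + rest
--     if rest and isinstance(rest[0], int):
--         return [value + rest[0]] + rest[1:]
--     return [value] + rest
--
--
-- def _replace_word_numbers(text: str) -> str:
--     return " ".join(str(x) for x in _merge(text.split()))
-- ===== Notes on version B (the rewrite author's own statement) =====
-- stated objective: simpler
-- what changed: Replaces A's two nested cursor loops (outer i-loop plus inner j-scan over a run) by a single right-to-left structural recursion that merges a number-word into the int sitting at the head of the already-processed tail, tagging merged sums by type.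
import Mathlib
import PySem

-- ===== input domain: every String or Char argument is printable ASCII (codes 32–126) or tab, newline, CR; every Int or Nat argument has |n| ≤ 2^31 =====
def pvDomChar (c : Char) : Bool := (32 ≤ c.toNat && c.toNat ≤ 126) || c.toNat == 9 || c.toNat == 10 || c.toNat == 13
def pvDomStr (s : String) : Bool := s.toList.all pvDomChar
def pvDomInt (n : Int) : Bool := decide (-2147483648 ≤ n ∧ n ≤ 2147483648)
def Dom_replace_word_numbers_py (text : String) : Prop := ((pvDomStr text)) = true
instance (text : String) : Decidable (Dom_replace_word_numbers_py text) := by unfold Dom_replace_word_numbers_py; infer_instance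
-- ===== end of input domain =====

-- B replaces A's explicit i/j cursor loops by a right-to-left structural recursion
-- that merges a number-word into the int at the head of the processed tail (objective: simpler).

-- shared module constant _WORD_NUMBERS
def pvWordNumbers : PySem.Dict String Int := PySem.Dict.ofList
  [("zero", 0), ("one", 1), ("two", 2), ("three", 3), ("four", 4), ("five", 5),
   ("six", 6), ("seven", 7), ("eight", 8), ("nine", 9), ("ten", 10),
   ("eleven", 11), ("twelve", 12), ("thirteen", 13), ("fourteen", 14),
   ("fifteen", 15), ("sixteen", 16), ("seventeen", 17), ("eighteen", 18),
   ("nineteen", 19), ("twenty", 20), ("thirty", 30), ("forty", 40),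
   ("fifty", 50), ("sixty", 60), ("seventy", 70), ("eighty", 80), ("ninety", 90)]

-- ===== PORT A =====

-- A's inner `while j < len(tokens)` loop: accumulate consecutive number-words
-- into `total`, returning (total, remaining tokens).
def pvAScan (tokens : List String) (total : Int) : Int × List String :=
  match tokens with
  | [] => (total, [])
  | t :: ts =>
    match pvWordNumbers.get? t with
    | none => (total, t :: ts)
    | some v => pvAScan ts (total + v)

theorem pvAScan_len (tokens : List String) (total : Int) :
    (pvAScan tokens total).2.length ≤ tokens.length := by
  induction tokens generalizing total with
  | nil => simp [pvAScan]
  | cons t ts ih =>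
    simp only [pvAScan]
    cases pvWordNumbers.get? t with
    | none => simp
    | some v => exact (ih _).trans (Nat.le_succ _)

-- A's outer `while i < len(tokens)` loop building `result`.
def pvALoop (tokens : List String) : List String :=
  match tokens with
  | [] => []
  | t :: ts =>
    match pvWordNumbers.get? t with
    | none => t :: pvALoop ts
    | some v =>
      let p := pvAScan ts v
      PySem.Int.toStr p.1 :: pvALoop p.2
termination_by tokens.length
decreasing_by
  all_goals simp only [List.length_cons]
  all_goals first
    | omega
    | exact Nat.lt_succ_of_le (pvAScan_len _ _)

def replace_word_numbers_py (text : String) : String :=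
  PySem.Str.join " " (pvALoop (PySem.Str.split₀ text))

-- ===== PORT B =====

-- B's recursive `_merge`: elements are either an int (.inl, a merged run sum)
-- or an untouched token (.inr).
def pvBMerge (tokens : List String) : List (Int ⊕ String) :=
  match tokens with
  | [] => []
  | t :: ts =>
    let rest := pvBMerge ts
    match pvWordNumbers.get? t with
    | none => .inr t :: rest
    | some v =>
      match rest with
      | .inl n :: rs => .inl (v + n) :: rs
      | _ => .inl v :: rest

-- str(x) of an element
def pvRender (x : Int ⊕ String) : String :=
  match x with
  | .inl n => PySem.Int.toStr n
  | .inr s => s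

def replace_word_numbers_py_alt (text : String) : String :=
  PySem.Str.join " " ((pvBMerge (PySem.Str.split₀ text)).map pvRender)

-- ===== PRECONDITION & SPEC =====
def Spec_replace_word_numbers_py (text : String) (out : String) : Prop := out = replace_word_numbers_py_alt text
instance (text : String) (out : String) : Decidable (Spec_replace_word_numbers_py text out) := by unfold Spec_replace_word_numbers_py; infer_instance

-- ===== CLAIM (what is proved, stated in full; the proofs are below) =====
def Claim_equal_replace_word_numbers_py : Prop := ∀ (text : String), Dom_replace_word_numbers_py text → Spec_replace_word_numbers_py text (replace_word_numbers_py text)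

-- ===== LEMMAS AND PROOFS =====

-- `consNum v rest` = what pvBMerge does with a number-word of value v on top of rest
def pvConsNum (v : Int) (rest : List (Int ⊕ String)) : List (Int ⊕ String) :=
  match rest with
  | .inl n :: rs => .inl (v + n) :: rs
  | _ => .inl v :: rest

theorem pvBMerge_cons (t : String) (ts : List String) :
    pvBMerge (t :: ts) =
      match pvWordNumbers.get? t with
      | none => .inr t :: pvBMerge ts
      | some v => pvConsNum v (pvBMerge ts) := by
  cases h : pvWordNumbers.get? t <;> simp [pvBMerge, pvConsNum, h]

theorem pvMain (tokens : List String) :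
    (pvBMerge tokens).map pvRender = pvALoop tokens ∧
    ∀ v : Int, (pvConsNum v (pvBMerge tokens)).map pvRender =
      PySem.Int.toStr (pvAScan tokens v).1 :: pvALoop (pvAScan tokens v).2 := by
  induction tokens with
  | nil => exact ⟨by simp [pvBMerge, pvALoop], fun v => by simp [pvConsNum, pvBMerge, pvAScan, pvALoop, pvRender]⟩
  | cons t ts ih =>
    obtain ⟨ih1, ih2⟩ := ih
    constructor
    · rw [pvBMerge_cons]
      cases h : pvWordNumbers.get? t with
      | none => simp [pvALoop, h, pvRender, ih1]
      | some v => simpa [pvALoop, h] using ih2 v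
    · intro v
      rw [pvBMerge_cons]
      cases h : pvWordNumbers.get? t with
      | none =>
        simp only [pvAScan, pvALoop, h, pvConsNum]
        simp [pvRender, ih1]
      | some w =>
        have key : pvConsNum v (pvConsNum w (pvBMerge ts)) =
            pvConsNum (v + w) (pvBMerge ts) := by
          cases hr : pvBMerge ts with
          | nil => simp [pvConsNum]
          | cons x rs =>
            cases x with
            | inl n => simp [pvConsNum, add_assoc]
            | inr s => simp [pvConsNum]
        rw [key]
        simpa [pvAScan, h] using ih2 (v + w)

-- ===== VERDICT (by name: the statement is the Claim_ definition above) =====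
theorem replace_word_numbers_py_spec : Claim_equal_replace_word_numbers_py := by
  intro text _
  unfold Spec_replace_word_numbers_py replace_word_numbers_py replace_word_numbers_py_alt
  rw [(pvMain (PySem.Str.split₀ text)).1]
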